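-- pv_equiv track=rewrite | github.com/Florenpain/ACT | TP1/main.py | n3
-- ===== SOURCE A (Python) =====
-- def n3(points, hauteur):
--     area_max = 0
--     # points_best_rectangle = [(0, 0), (0, 0), (0, 0), (0, 0)]
--     n = len(points)
--     for i in range(0, n):
--         for j in range(i, n):
--             hauteur_max = hauteur
--             (x1, y1) = points[i]
--             (x2, y2) = points[j]
--             largeur_max = x2 - x1
--             for k in range(i + 1, j):
--                 (x3, y3) = points[k]
--                 if hauteur_max > y3:
--                     hauteur_max = y3
--             if largeur_max * hauteur_max > area_max:
--                 area_max = largeur_max * hauteur_max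
--                 # points_best_rectangle = [(x1, 0), (x1, hauteur_max), (x2, hauteur_max), (x2, 0)]
--     return area_max
-- ===== SOURCE B (Python) =====
-- def n3(points, hauteur):
--     # One pass per i: maintain the interior minimum incrementally as j advances.
--     area_max = 0
--     n = len(points)
--     for i in range(n):
--         x1 = points[i][0]
--         hmin = hauteur
--         for j in range(i, n):
--             (x2, y2) = points[j]
--             area = (x2 - x1) * hmin
--             if area > area_max:
--                 area_max = area
--             if j > i and hmin > y2:
--                 hmin = y2
--     return area_max
-- ===== Notes on version B (the rewrite author's own statement) =====
-- stated objective: faster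
-- what changed: The inner O(n) re-scan that recomputes the interior minimum height for every pair (i,j) is replaced by maintaining that minimum incrementally while j advances, removing the innermost loop.
import Mathlib
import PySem

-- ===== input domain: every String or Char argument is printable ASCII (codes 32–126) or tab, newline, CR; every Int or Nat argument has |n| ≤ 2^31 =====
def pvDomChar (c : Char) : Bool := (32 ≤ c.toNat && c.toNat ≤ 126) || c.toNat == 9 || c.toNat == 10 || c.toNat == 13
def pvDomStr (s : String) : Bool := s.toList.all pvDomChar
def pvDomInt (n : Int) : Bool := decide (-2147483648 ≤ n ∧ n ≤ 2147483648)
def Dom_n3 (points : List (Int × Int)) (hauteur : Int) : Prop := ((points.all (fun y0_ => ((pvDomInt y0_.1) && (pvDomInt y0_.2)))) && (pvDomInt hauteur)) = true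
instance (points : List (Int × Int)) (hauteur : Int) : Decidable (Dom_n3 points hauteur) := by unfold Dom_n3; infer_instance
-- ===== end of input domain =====

-- B replaces A's innermost re-scan (interior minimum height per pair (i,j)) by a running
-- minimum maintained as j advances: O(n^2) instead of O(n^3). Return values identical.

-- ===== PORT A =====
-- inner k-loop body: running minimum of the interior heights
def n3InnerK (points : List (Int × Int)) (hm : Int) (k : Int) : Int :=
  let p3 := PySem.List.pyGetD points k (0, 0)
  if hm > p3.2 then p3.2 else hm

-- body of A's j-loop: recompute hauteur_max from scratch over k ∈ range(i+1, j)
def n3StepJ (points : List (Int × Int)) (hauteur i : Int) (area_max j : Int) : Int :=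
  let p1 := PySem.List.pyGetD points i (0, 0)
  let p2 := PySem.List.pyGetD points j (0, 0)
  let largeur_max := p2.1 - p1.1
  let hauteur_max := (PySem.List.pyRange (i + 1) j 1).foldl (n3InnerK points) hauteur
  if largeur_max * hauteur_max > area_max then largeur_max * hauteur_max else area_max

def n3 (points : List (Int × Int)) (hauteur : Int) : Int :=
  (PySem.List.pyRange 0 points.length 1).foldl
    (fun area_max i => (PySem.List.pyRange i points.length 1).foldl (n3StepJ points hauteur i) area_max)
    0

-- ===== PORT B =====
-- body of B's j-loop: state (area_max, hmin); hmin is updated incrementally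
def n3AltStep (points : List (Int × Int)) (i x1 : Int) (st : Int × Int) (j : Int) : Int × Int :=
  let p2 := PySem.List.pyGetD points j (0, 0)
  let area := (p2.1 - x1) * st.2
  let am := if area > st.1 then area else st.1
  let hm := if j > i ∧ st.2 > p2.2 then p2.2 else st.2
  (am, hm)

def n3_alt (points : List (Int × Int)) (hauteur : Int) : Int :=
  (PySem.List.pyRange 0 points.length 1).foldl
    (fun area_max i =>
      ((PySem.List.pyRange i points.length 1).foldl
        (n3AltStep points i ((PySem.List.pyGetD points i (0, 0)).1)) (area_max, hauteur)).1)
    0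

-- ===== PRECONDITION & SPEC =====
def Spec_n3 (points : List (Int × Int)) (hauteur : Int) (out : Int) : Prop := out = n3_alt points hauteur
instance (points : List (Int × Int)) (hauteur : Int) (out : Int) : Decidable (Spec_n3 points hauteur out) := by unfold Spec_n3; infer_instance

-- ===== CLAIM (what is proved, stated in full; the proofs are below) =====
def Claim_equal_n3 : Prop := ∀ (points : List (Int × Int)) (hauteur : Int), Dom_n3 points hauteur → Spec_n3 points hauteur (n3 points hauteur)

-- ===== LEMMAS AND PROOFS =====

-- the interior minimum A recomputes for pair (i, j)
def n3H (points : List (Int × Int)) (hauteur i j : Int) : Int :=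
  (PySem.List.pyRange (i + 1) j 1).foldl (n3InnerK points) hauteur

-- invariant: B's inner fold starting from (a, interior-min at j) returns A's inner fold value
lemma n3_inner (points : List (Int × Int)) (hauteur i : Int) :
    ∀ (m : Nat) (j a : Int), i ≤ j → (points.length : Int) - j ≤ m →
      ((PySem.List.pyRange j points.length 1).foldl
          (n3AltStep points i ((PySem.List.pyGetD points i (0, 0)).1))
          (a, n3H points hauteur i j)).1
        = (PySem.List.pyRange j points.length 1).foldl (n3StepJ points hauteur i) a := by
  intro m
  induction m with
  | zero =>
    intro j a hij hb
    rw [PySem.List.pyRange_one_eq_nil (by omega)]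
    simp [List.foldl]
  | succ m ih =>
    intro j a hij hb
    by_cases hjn : (points.length : Int) ≤ j
    · rw [PySem.List.pyRange_one_eq_nil hjn]; simp [List.foldl]
    · rw [PySem.List.pyRange_one_cons (by omega)]
      simp only [List.foldl_cons]
      have hstep :
          n3AltStep points i ((PySem.List.pyGetD points i (0, 0)).1)
              (a, n3H points hauteur i j) j
            = (n3StepJ points hauteur i a j, n3H points hauteur i (j + 1)) := by
        rcases eq_or_lt_of_le hij with he | hlt
        · subst he
          have h1 : n3H points hauteur i i = hauteur := by
            unfold n3H; rw [PySem.List.pyRange_one_eq_nil (by omega)]; rfl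
          have h2 : n3H points hauteur i (i + 1) = hauteur := by
            unfold n3H; rw [PySem.List.pyRange_one_eq_nil (by omega)]; rfl
          rw [h1, h2]
          simp [n3AltStep, n3StepJ, PySem.List.pyRange_one_eq_nil (by omega : i ≤ i + 1)]
        · have h2 : n3H points hauteur i (j + 1)
              = n3InnerK points (n3H points hauteur i j) j := by
            unfold n3H
            rw [PySem.List.pyRange_one_succ_right (by omega), List.foldl_append]
            rfl
          rw [h2]
          simp only [n3AltStep, n3StepJ, n3InnerK, Prod.mk.injEq]
          refine ⟨rfl, ?_⟩
          split_ifs with h3 h4 h4 <;> first | rfl | omega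
      rw [hstep]
      exact ih (j + 1) _ (by omega) (by omega)

lemma n3_step_eq (points : List (Int × Int)) (hauteur : Int) (a i : Int) :
    ((PySem.List.pyRange i points.length 1).foldl
        (n3AltStep points i ((PySem.List.pyGetD points i (0, 0)).1)) (a, hauteur)).1
      = (PySem.List.pyRange i points.length 1).foldl (n3StepJ points hauteur i) a := by
  have hH : n3H points hauteur i i = hauteur := by
    unfold n3H; rw [PySem.List.pyRange_one_eq_nil (by omega)]; rfl
  have := n3_inner points hauteur i ((points.length : Int) - i).toNat i a le_rfl (by omega)
  rwa [hH] at this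

-- ===== VERDICT (by name: the statement is the Claim_ definition above) =====
theorem n3_spec : Claim_equal_n3 := by
  intro points hauteur _
  unfold Spec_n3 n3 n3_alt
  congr 1
  funext a i
  exact (n3_step_eq points hauteur a i).symm
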